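-- pv_equiv track=rewrite | github.com/ApolloAuto/apollo | modules/tools/plot_planning/plot_speed_jerk.py | generate_speed_jerk_dict
-- ===== SOURCE A (Python) =====
-- def generate_speed_jerk_dict(speed_jerk_dict, speed_list, jerk_list):
--     for i in range(len(speed_list)):
--         speed = int(speed_list[i])
--         jerk = int(jerk_list[i])
--         if speed in speed_jerk_dict:
--             if jerk not in speed_jerk_dict[speed]:
--                 speed_jerk_dict[speed].append(jerk)
--         else:
--             speed_jerk_dict[speed] = [jerk]
--     return speed_jerk_dict
-- ===== SOURCE B (Python) =====
-- def generate_speed_jerk_dict(speed_jerk_dict, speed_list, jerk_list):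
--     # Pass 1: group the jerks by speed (first-encounter key order).
--     groups = {}
--     for i in range(len(speed_list)):
--         groups.setdefault(int(speed_list[i]), []).append(int(jerk_list[i]))
--     # Pass 2: merge each group's distinct jerks into the caller's dict.
--     for speed, jerks in groups.items():
--         lst = speed_jerk_dict.setdefault(speed, [])
--         for jerk in dict.fromkeys(jerks):
--             if jerk not in lst:
--                 lst.append(jerk)
--     return speed_jerk_dict
-- ===== Notes on version B (the rewrite author's own statement) =====
-- stated objective: alternative
-- what changed: A updates the result dict inside a single interleaved scan; B first builds an intermediate speed->jerks grouping table in one pass, then merges each group's deduplicated jerks into the caller's dict in a separate second pass.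
import Mathlib
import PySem

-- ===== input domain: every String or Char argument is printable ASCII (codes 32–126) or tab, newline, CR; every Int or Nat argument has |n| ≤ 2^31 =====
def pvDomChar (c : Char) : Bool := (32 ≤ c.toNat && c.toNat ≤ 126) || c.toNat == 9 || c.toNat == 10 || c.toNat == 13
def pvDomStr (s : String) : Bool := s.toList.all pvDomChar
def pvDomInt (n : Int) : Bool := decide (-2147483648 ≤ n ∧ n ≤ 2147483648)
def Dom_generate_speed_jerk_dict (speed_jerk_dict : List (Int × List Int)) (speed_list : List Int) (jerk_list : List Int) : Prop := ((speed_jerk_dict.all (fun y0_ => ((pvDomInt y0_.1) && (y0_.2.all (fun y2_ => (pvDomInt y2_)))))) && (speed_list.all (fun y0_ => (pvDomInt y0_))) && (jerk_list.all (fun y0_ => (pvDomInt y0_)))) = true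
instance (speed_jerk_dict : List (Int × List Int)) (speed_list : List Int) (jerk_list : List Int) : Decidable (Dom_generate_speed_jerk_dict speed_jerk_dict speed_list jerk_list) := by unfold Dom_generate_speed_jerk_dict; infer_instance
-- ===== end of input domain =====

-- B replaces A's single interleaved scan by a grouping pass plus a separate merge pass (objective: alternative
-- decomposition, same cost). Both Pythons mutate speed_jerk_dict in place in the same way; the theorems are about
-- the returned value (the dict as an association list in insertion order).

-- ===== PORT A =====
-- one loop body: `if speed in d: if jerk not in d[speed]: d[speed].append(jerk) else: d[speed] = [jerk]`
-- (`speed in d` is get?.isSome; int(...) on an already-int element is the identity)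
def pvStepA (d : PySem.Dict Int (List Int)) (speed jerk : Int) : PySem.Dict Int (List Int) :=
  match d.get? speed with
  | some lst => if jerk ∈ lst then d else d.insert speed (lst ++ [jerk])
  | none => d.insert speed [jerk]

def generate_speed_jerk_dict (speed_jerk_dict : List (Int × List Int)) (speed_list : List Int) (jerk_list : List Int) : List (Int × List Int) :=
  ((List.range speed_list.length).foldl
    (fun d (i : Nat) =>
      match PySem.List.pyGet? speed_list (i : Int), PySem.List.pyGet? jerk_list (i : Int) with
      | some speed, some jerk => pvStepA d speed jerk
      | _, _ => d)                              -- none = IndexError in Python; excluded by Pre_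
    (PySem.Dict.ofList speed_jerk_dict)).items

-- ===== PORT B =====
def pvStep2 (cur : List Int) (jerk : Int) : List Int :=  -- `if jerk not in lst: lst.append(jerk)`
  if jerk ∈ cur then cur else cur ++ [jerk]

-- merge one group: `lst = speed_jerk_dict.setdefault(speed, []); for jerk in dict.fromkeys(jerks): ...`
def pvMergeOne (d : PySem.Dict Int (List Int)) (speed : Int) (jerks : List Int) : PySem.Dict Int (List Int) :=
  d.insert speed ((PySem.List.dedup jerks).foldl pvStep2 (d.getD speed []))

-- pass 1: `groups.setdefault(int(speed_list[i]), []).append(int(jerk_list[i]))`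
def pvGroups (speed_list : List Int) (jerk_list : List Int) : PySem.Dict Int (List Int) :=
  (List.range speed_list.length).foldl
    (fun g (i : Nat) =>
      match PySem.List.pyGet? speed_list (i : Int) with
      | none => g                               -- IndexError in Python; excluded by Pre_
      | some speed =>
        match PySem.List.pyGet? jerk_list (i : Int) with
        | none => g                             -- IndexError in Python; excluded by Pre_
        | some jerk => g.insert speed (g.getD speed [] ++ [jerk]))
    PySem.Dict.empty

def generate_speed_jerk_dict_alt (speed_jerk_dict : List (Int × List Int)) (speed_list : List Int) (jerk_list : List Int) : List (Int × List Int) :=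
  -- pass 2: `for speed, jerks in groups.items():` merge the deduplicated jerks into the caller's dict
  ((pvGroups speed_list jerk_list).items.foldl (fun d p => pvMergeOne d p.1 p.2)
    (PySem.Dict.ofList speed_jerk_dict)).items

-- ===== PRECONDITION & SPEC =====
-- Pre_ excludes exactly the inputs where the Python A raises IndexError: jerk_list shorter than speed_list.
def Pre_generate_speed_jerk_dict (speed_jerk_dict : List (Int × List Int)) (speed_list : List Int) (jerk_list : List Int) : Prop :=
  speed_list.length ≤ jerk_list.length
instance (speed_jerk_dict : List (Int × List Int)) (speed_list : List Int) (jerk_list : List Int) : Decidable (Pre_generate_speed_jerk_dict speed_jerk_dict speed_list jerk_list) := by unfold Pre_generate_speed_jerk_dict; infer_instance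

def pvWitness_generate_speed_jerk_dict : (List (Int × List Int)) × List Int × List Int := ([(1, [2])], [1, 1, 3], [2, 4, 5])

def Spec_generate_speed_jerk_dict (speed_jerk_dict : List (Int × List Int)) (speed_list : List Int) (jerk_list : List Int) (out : List (Int × List Int)) : Prop := out = generate_speed_jerk_dict_alt speed_jerk_dict speed_list jerk_list
instance (speed_jerk_dict : List (Int × List Int)) (speed_list : List Int) (jerk_list : List Int) (out : List (Int × List Int)) : Decidable (Spec_generate_speed_jerk_dict speed_jerk_dict speed_list jerk_list out) := by unfold Spec_generate_speed_jerk_dict; infer_instance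

-- ===== CLAIM (what is proved, stated in full; the proofs are below) =====
def Claim_equal_generate_speed_jerk_dict : Prop := ∀ (speed_jerk_dict : List (Int × List Int)) (speed_list : List Int) (jerk_list : List Int), Dom_generate_speed_jerk_dict speed_jerk_dict speed_list jerk_list → Pre_generate_speed_jerk_dict speed_jerk_dict speed_list jerk_list → Spec_generate_speed_jerk_dict speed_jerk_dict speed_list jerk_list (generate_speed_jerk_dict speed_jerk_dict speed_list jerk_list)

-- ===== LEMMAS AND PROOFS =====

theorem pvGet_cons_succ (xs : List Int) (x : Int) (i : Nat) :
    PySem.List.pyGet? (x :: xs) ((i : Int) + 1) = PySem.List.pyGet? xs (i : Int) := by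
  have h0 : (0:Int) ≤ (i:Int)+1 := by omega
  have h0' : (0:Int) ≤ (i:Int) := by omega
  have h1 : ((i:Int)+1).toNat = i+1 := by omega
  simp only [PySem.List.pyGet?, PySem.List.pyIdx?, if_pos h0, if_pos h0', h1, Int.toNat_natCast]
  by_cases h : i < xs.length
  · have h2 : ((i:Int)+1) < ((x::xs).length:Int) := by simp; omega
    have h3 : ((i:Int)) < (xs.length:Int) := by exact_mod_cast h
    simp [h2, h3]
  · have h2 : ¬ ((i:Int)+1) < ((x::xs).length:Int) := by simp; omega
    have h3 : ¬ ((i:Int)) < (xs.length:Int) := by omega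
    simp [h2, h3]

theorem pvGet_nil (i : Int) : PySem.List.pyGet? ([] : List Int) i = none := by
  simp [PySem.List.pyGet?, PySem.List.pyIdx?]

theorem pvFoldRangeZip {σ : Type} (step : σ → Int → Int → σ) :
    ∀ (sl jl : List Int) (st : σ),
      (List.range sl.length).foldl
        (fun d (i : Nat) =>
          match PySem.List.pyGet? sl (i : Int), PySem.List.pyGet? jl (i : Int) with
          | some s, some j => step d s j
          | _, _ => d) st
      = (sl.zip jl).foldl (fun d p => step d p.1 p.2) st := by
  intro sl
  induction sl with
  | nil => intro jl st; simp
  | cons x xs ih =>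
    intro jl st
    cases jl with
    | nil =>
      simp only [List.zip_nil_right, List.foldl_nil]
      have : ∀ (l : List Nat) (st : σ), l.foldl
        (fun d (i : Nat) =>
          match PySem.List.pyGet? (x::xs) (i : Int), PySem.List.pyGet? ([]:List Int) (i : Int) with
          | some s, some j => step d s j
          | _, _ => d) st = st := by
        intro l
        induction l with
        | nil => intro st; rfl
        | cons a t iht =>
          intro st
          rw [List.foldl_cons, pvGet_nil]
          rcases PySem.List.pyGet? (x::xs) ((a:Nat) : Int) with _ | v <;> exact iht st
      exact this _ st
    | cons y ys =>
      rw [List.length_cons, List.range_succ_eq_map, List.foldl_cons, List.foldl_map]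
      have h0 : PySem.List.pyGet? (x::xs) ((0:Nat) : Int) = some x := by
        simp [PySem.List.pyGet?, PySem.List.pyIdx?]
      have h0' : PySem.List.pyGet? (y::ys) ((0:Nat) : Int) = some y := by
        simp [PySem.List.pyGet?, PySem.List.pyIdx?]
      rw [h0, h0']
      have hfun : (fun (d : σ) (i : Nat) =>
          match PySem.List.pyGet? (x::xs) ((i+1 : Nat) : Int), PySem.List.pyGet? (y::ys) ((i+1 : Nat) : Int) with
          | some s, some j => step d s j
          | _, _ => d)
        = (fun (d : σ) (i : Nat) =>
          match PySem.List.pyGet? xs (i : Int), PySem.List.pyGet? ys (i : Int) with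
          | some s, some j => step d s j
          | _, _ => d) := by
        funext d i
        have : ((i+1 : Nat) : Int) = (i : Int) + 1 := by push_cast; ring
        rw [this, pvGet_cons_succ, pvGet_cons_succ]
      simp only [Nat.succ_eq_add_one] at *
      rw [hfun, ih, List.zip_cons_cons, List.foldl_cons]

theorem pvMapIdOfNoKey (s : Int) (b : List Int) (l : List (Int × List Int))
    (h : ∀ p ∈ l, ¬ p.1 = s) :
    l.map (fun p => if (p.1 == s) = true then (s, b) else p) = l := by
  have := List.map_congr_left (l := l)
    (f := fun p => if (p.1 == s) = true then (s, b) else p) (g := id)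
    (by intro p hp; simp [h p hp])
  simpa using this

theorem pvInsertSame (d : PySem.Dict Int (List Int)) (s : Int) (L : List Int)
    (hn : d.keys.Nodup) (hg : d.get? s = some L) : d.insert s L = d := by
  obtain ⟨l⟩ := d
  simp only [PySem.Dict.keys] at hn
  induction l with
  | nil => simp [PySem.Dict.get?] at hg
  | cons a t ih =>
    obtain ⟨k, v⟩ := a
    simp only [List.map_cons, List.nodup_cons] at hn
    by_cases hk : k = s
    · have hb : (k == s) = true := by simp [hk]
      have hv : v = L := by simp [PySem.Dict.get?, hb] at hg; exact hg
      have hcont : PySem.Dict.contains (⟨(k,v)::t⟩ : PySem.Dict Int (List Int)) s = true := by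
        simp [PySem.Dict.contains, hb]
      simp only [PySem.Dict.insert, hcont, if_pos, List.map_cons, hb, if_true,
        PySem.Dict.mk.injEq]
      rw [pvMapIdOfNoKey s L t (by
        intro p hp hps
        refine hn.1 ?_
        rw [← hk, ← hps] at *
        exact List.mem_map.mpr ⟨p, hp, rfl⟩), ← hv, ← hk]
    · have hb : (k == s) = false := by simp [hk]
      have hg' : PySem.Dict.get? ⟨t⟩ s = some L := by
        simpa [PySem.Dict.get?, hb] using hg
      have hct : PySem.Dict.contains (⟨t⟩ : PySem.Dict Int (List Int)) s = true := by
        rw [PySem.Dict.contains_eq_isSome_get?, hg']; rfl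
      have hmap : List.map (fun p => if (p.1 == s) = true then (s, L) else p) t = t := by
        have h2 := congrArg PySem.Dict.items (ih hn.2 hg')
        simpa only [PySem.Dict.insert, hct, if_pos] using h2
      have h1 : PySem.Dict.contains (⟨(k,v)::t⟩ : PySem.Dict Int (List Int)) s = true := by
        simp only [PySem.Dict.contains, List.any_cons, hb, Bool.false_or]
        simpa [PySem.Dict.contains] using hct
      simp only [PySem.Dict.insert, h1, if_pos, List.map_cons, hb, Bool.false_eq_true, if_false,
        PySem.Dict.mk.injEq]
      rw [hmap]

theorem pvItemsExt (d1 d2 : PySem.Dict Int (List Int)) (h : d1.items = d2.items) : d1 = d2 := by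
  obtain ⟨a⟩ := d1; obtain ⟨b⟩ := d2; cases h; rfl

theorem pvNoKey (d : PySem.Dict Int (List Int)) (s : Int) (hc : d.contains s = false) :
    ∀ p ∈ d.items, ¬ p.1 = s := by
  intro p hp hps
  have : d.contains s = true := by
    simp only [PySem.Dict.contains]
    exact List.any_eq_true.mpr ⟨p, hp, by simp [hps]⟩
  rw [this] at hc; simp at hc

theorem pvInsertCollapse (d : PySem.Dict Int (List Int)) (s : Int) (a b : List Int) :
    (d.insert s a).insert s b = d.insert s b := by
  apply pvItemsExt
  cases hc : d.contains s with
  | false =>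
    have h1 := PySem.Dict.items_insert_of_not_contains d a hc
    have hc2 : (d.insert s a).contains s = true := by
      rw [PySem.Dict.contains_insert]; simp
    rw [PySem.Dict.items_insert_of_contains _ b hc2, h1,
      PySem.Dict.items_insert_of_not_contains d b hc, List.map_append,
      pvMapIdOfNoKey s b d.items (pvNoKey d s hc)]
    simp
  | true =>
    have hc2 : (d.insert s a).contains s = true := by
      rw [PySem.Dict.contains_insert]; simp
    rw [PySem.Dict.items_insert_of_contains _ b hc2,
      PySem.Dict.items_insert_of_contains _ a hc,
      PySem.Dict.items_insert_of_contains _ b hc, List.map_map]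
    apply List.map_congr_left
    intro p _
    by_cases hps : p.1 = s
    · simp [hps]
    · simp [hps]

theorem pvInsertComm (d : PySem.Dict Int (List Int)) {k s : Int} (a b : List Int)
    (hk : k ≠ s) (hs : d.contains s = true) :
    (d.insert k a).insert s b = (d.insert s b).insert k a := by
  apply pvItemsExt
  have cs2 : (d.insert k a).contains s = true := by
    rw [PySem.Dict.contains_insert]; simp [hs]
  cases hck : d.contains k with
  | false =>
    have ck2 : (d.insert s b).contains k = false := by
      rw [PySem.Dict.contains_insert]; simp [hck, hk]
    rw [PySem.Dict.items_insert_of_contains _ b cs2,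
      PySem.Dict.items_insert_of_not_contains _ a hck,
      PySem.Dict.items_insert_of_not_contains _ a ck2,
      PySem.Dict.items_insert_of_contains _ b hs, List.map_append]
    have : (((k, a) : Int × List Int).1 == s) = false := by simp [hk]
    simp [this, hk]
  | true =>
    have ck2 : (d.insert s b).contains k = true := by
      rw [PySem.Dict.contains_insert]; simp [hck]
    rw [PySem.Dict.items_insert_of_contains _ b cs2,
      PySem.Dict.items_insert_of_contains _ a hck,
      PySem.Dict.items_insert_of_contains _ a ck2,
      PySem.Dict.items_insert_of_contains _ b hs, List.map_map, List.map_map]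
    apply List.map_congr_left
    intro p _
    by_cases h1 : p.1 = k
    · simp [h1, hk, Ne.symm hk]
    · by_cases h2 : p.1 = s <;> simp [h1, h2, hk, Ne.symm hk]

theorem pvMemFoldStep2 {j : Int} : ∀ (l lst : List Int), (j ∈ lst ∨ j ∈ l) → j ∈ l.foldl pvStep2 lst := by
  intro l
  induction l with
  | nil => intro lst h; simpa using h.resolve_right (by simp)
  | cons a t ih =>
    intro lst h
    rw [List.foldl_cons]
    rcases h with h | h
    · exact ih _ (Or.inl (by unfold pvStep2; split <;> simp [h]))
    · rcases List.mem_cons.mp h with rfl | h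
      · exact ih _ (Or.inl (by unfold pvStep2; split <;> simp_all))
      · exact ih _ (Or.inr h)

theorem pvDedupAppend (vs : List Int) (j : Int) :
    PySem.List.dedup (vs ++ [j]) = if j ∈ vs then PySem.List.dedup vs else PySem.List.dedup vs ++ [j] := by
  simp only [PySem.List.dedup, PySem.Set.ofList, List.foldl_append, List.foldl_cons, List.foldl_nil,
    PySem.Set.add]
  have hmem : (List.foldl PySem.Set.add PySem.Set.empty vs).contains j = decide (j ∈ vs) := by
    have h1 : ∀ x, x ∈ List.foldl PySem.Set.add PySem.Set.empty vs ↔ x ∈ vs := fun x =>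
      PySem.Set.mem_ofList vs x
    by_cases h : j ∈ vs
    · simp only [h, decide_true]
      exact List.contains_iff_mem.mpr ((h1 j).mpr h)
    · simp only [h, decide_false]
      rw [Bool.eq_false_iff]
      intro hc
      exact h ((h1 j).mp (List.contains_iff_mem.mp hc))
  rw [hmem]
  by_cases h : j ∈ vs <;> simp [h]

theorem pvMergeSingle (D : PySem.Dict Int (List Int)) (s j : Int) (hn : D.keys.Nodup) :
    pvMergeOne D s [j] = pvStepA D s j := by
  unfold pvMergeOne pvStepA
  have hd : PySem.List.dedup [j] = [j] := rfl
  rw [hd, List.foldl_cons, List.foldl_nil]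
  cases hg : D.get? s with
  | none =>
    rw [PySem.Dict.getD_eq_get?_getD, hg]
    simp [pvStep2]
  | some L =>
    rw [PySem.Dict.getD_eq_get?_getD, hg]
    unfold pvStep2
    by_cases hj : j ∈ L
    · simp only [Option.getD_some, hj, if_pos]
      exact pvInsertSame D s L hn hg
    · simp [hj]

theorem pvStep2_def (cur : List Int) (j : Int) :
    pvStep2 cur j = if j ∈ cur then cur else cur ++ [j] := rfl

theorem pvMergeSnoc (P : PySem.Dict Int (List Int)) (s j : Int) (vs : List Int) :
    pvMergeOne P s (vs ++ [j]) = pvStepA (pvMergeOne P s vs) s j := by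
  unfold pvMergeOne pvStepA
  rw [PySem.Dict.get?_insert_self, pvDedupAppend]
  by_cases hv : j ∈ vs
  · have hjL : j ∈ (PySem.List.dedup vs).foldl pvStep2 (P.getD s []) :=
      pvMemFoldStep2 _ _ (Or.inr (by
        simpa [PySem.List.dedup] using (PySem.Set.mem_ofList vs j).mpr hv))
    rw [if_pos hv]
    simp only [hjL, if_pos]
  · rw [if_neg hv, List.foldl_append, List.foldl_cons, List.foldl_nil]
    by_cases hjL : j ∈ (PySem.List.dedup vs).foldl pvStep2 (P.getD s [])
    · have h2 : pvStep2 ((PySem.List.dedup vs).foldl pvStep2 (P.getD s [])) j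
          = (PySem.List.dedup vs).foldl pvStep2 (P.getD s []) := by
        rw [pvStep2_def, if_pos hjL]
      rw [h2]
      simp only [hjL, if_pos]
    · have h2 : pvStep2 ((PySem.List.dedup vs).foldl pvStep2 (P.getD s [])) j
          = (PySem.List.dedup vs).foldl pvStep2 (P.getD s []) ++ [j] := by
        rw [pvStep2_def, if_neg hjL]
      rw [h2]
      simp only [hjL, if_false]
      rw [pvInsertCollapse]

theorem pvStepCommOne (D : PySem.Dict Int (List Int)) {k s : Int} (j : Int) (vs' : List Int)
    (hk : k ≠ s) (hs : D.contains s = true) :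
    pvStepA (pvMergeOne D k vs') s j = pvMergeOne (pvStepA D s j) k vs' := by
  have hgs : ∃ L, D.get? s = some L := by
    rw [PySem.Dict.contains_eq_isSome_get?] at hs
    exact Option.isSome_iff_exists.mp hs
  obtain ⟨L, hgs⟩ := hgs
  unfold pvMergeOne pvStepA
  rw [PySem.Dict.get?_insert_of_ne _ _ (Ne.symm hk), hgs]
  by_cases hj : j ∈ L
  · simp only [hj, if_pos, hgs]
  · simp only [hj, if_false, hgs, if_neg hj]
    rw [PySem.Dict.getD_insert_of_ne _ _ _ hk]
    rw [pvInsertComm D _ _ hk hs]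

theorem pvMergeOneContains (D : PySem.Dict Int (List Int)) (k : Int) (vs : List Int) (s : Int)
    (hs : D.contains s = true) : (pvMergeOne D k vs).contains s = true := by
  unfold pvMergeOne
  rw [PySem.Dict.contains_insert, hs, Bool.or_true]

theorem pvStepCommFold (post : List (Int × List Int)) (s j : Int) :
    ∀ (D : PySem.Dict Int (List Int)), (∀ p ∈ post, ¬ p.1 = s) → D.contains s = true →
      post.foldl (fun d p => pvMergeOne d p.1 p.2) (pvStepA D s j)
      = pvStepA (post.foldl (fun d p => pvMergeOne d p.1 p.2) D) s j := by
  induction post with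
  | nil => intro D _ _; rfl
  | cons a t ih =>
    intro D hkeys hs
    rw [List.foldl_cons, List.foldl_cons,
      ← pvStepCommOne D j a.2 (hkeys a (List.mem_cons_self)) hs]
    exact ih _ (fun p hp => hkeys p (List.mem_cons_of_mem a hp)) (pvMergeOneContains D a.1 a.2 s hs)

theorem pvSplit (g : PySem.Dict Int (List Int)) (s : Int) (hn : g.keys.Nodup)
    (hc : g.contains s = true) :
    ∃ pre vs post, g.items = pre ++ ((s, vs) :: post) ∧ (∀ p ∈ pre, ¬ p.1 = s) ∧
      (∀ p ∈ post, ¬ p.1 = s) ∧ g.getD s [] = vs := by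
  have hc' : g.items.any (fun p => p.1 == s) = true := hc
  obtain ⟨p, hp, hps⟩ := List.any_eq_true.mp hc'
  obtain ⟨k, vs⟩ := p
  have hks : k = s := by simpa using hps
  subst hks
  obtain ⟨pre, post, hsplit⟩ := List.append_of_mem hp
  have hnodup : ((pre.map (fun x => x.1)) ++ k :: (post.map (fun x => x.1))).Nodup := by
    have := hn
    rw [PySem.Dict.keys, hsplit, List.map_append, List.map_cons] at this
    exact this
  have hpre : k ∉ pre.map (fun x => x.1) := by
    intro hmem
    exact (List.disjoint_of_nodup_append hnodup) hmem (List.mem_cons_self)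
  have hpost : k ∉ post.map (fun x => x.1) := by
    have h2 := hnodup.of_append_right
    rw [List.nodup_cons] at h2
    exact h2.1
  refine ⟨pre, vs, post, hsplit, ?_, ?_, ?_⟩
  · intro q hq hqs
    exact hpre (List.mem_map.mpr ⟨q, hq, hqs⟩)
  · intro q hq hqs
    exact hpost (List.mem_map.mpr ⟨q, hq, hqs⟩)
  · have hfind : List.find? (fun q => q.1 == k) pre = none := by
      apply List.find?_eq_none.mpr
      intro q hq
      simp only [beq_iff_eq]
      intro hqs
      exact hpre (List.mem_map.mpr ⟨q, hq, hqs⟩)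
    rw [PySem.Dict.getD_eq_get?_getD]
    simp only [PySem.Dict.get?, hsplit, List.find?_append, hfind, Option.none_or]
    simp

theorem pvNodupFold {α : Type} (f : PySem.Dict Int (List Int) → α → PySem.Dict Int (List Int))
    (hf : ∀ d a, d.keys.Nodup → (f d a).keys.Nodup) :
    ∀ (l : List α) (d : PySem.Dict Int (List Int)), d.keys.Nodup → (l.foldl f d).keys.Nodup := by
  intro l
  induction l with
  | nil => intro d h; exact h
  | cons a t ih => intro d h; exact ih _ (hf d a h)

theorem pvCore (g : PySem.Dict Int (List Int)) (d0 : PySem.Dict Int (List Int)) (s j : Int)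
    (hg : g.keys.Nodup) (hd0 : d0.keys.Nodup) :
    (g.insert s (g.getD s [] ++ [j])).items.foldl (fun d p => pvMergeOne d p.1 p.2) d0
    = pvStepA (g.items.foldl (fun d p => pvMergeOne d p.1 p.2) d0) s j := by
  cases hc : g.contains s with
  | false =>
    rw [PySem.Dict.items_insert_of_not_contains _ _ hc, List.foldl_append, List.foldl_cons,
      List.foldl_nil]
    simp only
    rw [PySem.Dict.getD_of_not_contains _ _ hc, List.nil_append]
    have hnod : (g.items.foldl (fun d p => pvMergeOne d p.1 p.2) d0).keys.Nodup :=
      pvNodupFold _ (fun d a h => PySem.Dict.nodup_keys_insert _ _ _ h) _ _ hd0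
    exact pvMergeSingle _ s j hnod
  | true =>
    obtain ⟨pre, vs, post, hsplit, hpre, hpost, hgd⟩ := pvSplit g s hg hc
    have hmap : (g.insert s (g.getD s [] ++ [j])).items = pre ++ ((s, vs ++ [j]) :: post) := by
      rw [PySem.Dict.items_insert_of_contains _ _ hc, hsplit, List.map_append, List.map_cons]
      rw [pvMapIdOfNoKey s _ pre hpre, pvMapIdOfNoKey s _ post hpost]
      simp [hgd]
    rw [hmap, hsplit, List.foldl_append, List.foldl_append, List.foldl_cons, List.foldl_cons]
    simp only
    rw [pvMergeSnoc, pvStepCommFold post s j _ hpost]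
    unfold pvMergeOne
    rw [PySem.Dict.contains_insert]
    simp

theorem pvMain (pairs : List (Int × Int)) (d0 : PySem.Dict Int (List Int)) (hd0 : d0.keys.Nodup) :
    pairs.foldl (fun d p => pvStepA d p.1 p.2) d0
    = (pairs.foldl (fun g p => g.insert p.1 (g.getD p.1 [] ++ [p.2])) PySem.Dict.empty).items.foldl
        (fun d p => pvMergeOne d p.1 p.2) d0 := by
  induction pairs using List.reverseRecOn with
  | nil => rfl
  | append_singleton ps q ih =>
    rw [List.foldl_append, List.foldl_append, List.foldl_cons, List.foldl_nil,
      List.foldl_cons, List.foldl_nil]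
    have hgnod : (ps.foldl (fun g p => g.insert p.1 (g.getD p.1 [] ++ [p.2]))
        PySem.Dict.empty).keys.Nodup :=
      pvNodupFold _ (fun d a h => PySem.Dict.nodup_keys_insert _ _ _ h) _ _
        PySem.Dict.nodup_keys_empty
    rw [pvCore _ d0 q.1 q.2 hgnod hd0, ih]

-- the two range-folds of the ports, specialised from pvFoldRangeZip
theorem pvFoldRangeZipA (sl jl : List Int) (st : PySem.Dict Int (List Int)) :
    (List.range sl.length).foldl
      (fun d (i : Nat) =>
        match PySem.List.pyGet? sl (i : Int), PySem.List.pyGet? jl (i : Int) with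
        | some speed, some jerk => pvStepA d speed jerk
        | _, _ => d) st
    = (sl.zip jl).foldl (fun d p => pvStepA d p.1 p.2) st :=
  pvFoldRangeZip (fun d s j => pvStepA d s j) sl jl st

theorem pvFoldRangeZipB (sl jl : List Int) (st : PySem.Dict Int (List Int)) :
    (List.range sl.length).foldl
      (fun g (i : Nat) =>
        match PySem.List.pyGet? sl (i : Int) with
        | none => g
        | some speed =>
          match PySem.List.pyGet? jl (i : Int) with
          | none => g
          | some jerk => g.insert speed (g.getD speed [] ++ [jerk])) st
    = (sl.zip jl).foldl (fun g p => g.insert p.1 (g.getD p.1 [] ++ [p.2])) st := by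
  have hbody : (fun (g : PySem.Dict Int (List Int)) (i : Nat) =>
      match PySem.List.pyGet? sl (i : Int) with
      | none => g
      | some speed =>
        match PySem.List.pyGet? jl (i : Int) with
        | none => g
        | some jerk => g.insert speed (g.getD speed [] ++ [jerk]))
    = (fun (g : PySem.Dict Int (List Int)) (i : Nat) =>
      match PySem.List.pyGet? sl (i : Int), PySem.List.pyGet? jl (i : Int) with
      | some s, some j => g.insert s (g.getD s [] ++ [j])
      | _, _ => g) := by
    funext g i
    cases PySem.List.pyGet? sl (i : Int) <;> cases PySem.List.pyGet? jl (i : Int) <;> rfl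
  rw [hbody]
  exact pvFoldRangeZip (fun g s j => g.insert s (g.getD s [] ++ [j])) sl jl st

-- ===== VERDICT (by name: the statement is the Claim_ definition above) =====
theorem generate_speed_jerk_dict_spec : Claim_equal_generate_speed_jerk_dict := by
  intro sjd sl jl _ _
  unfold Spec_generate_speed_jerk_dict generate_speed_jerk_dict generate_speed_jerk_dict_alt pvGroups
  rw [pvFoldRangeZipA sl jl, pvFoldRangeZipB sl jl,
    pvMain (sl.zip jl) _ (PySem.Dict.nodup_keys_ofList sjd)]
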